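-- pv_equiv track=rewrite | github.com/Diogenes1984/Analise-textos | core/cohpiah.py | lista_palavras_diferentes
-- ===== SOURCE A (Python) =====
-- def lista_palavras_diferentes(lista_palavras):
--     '''
--     Essa funcao recebe uma lista de palavras e devolve uma lista de
--     palavras diferentes utilizadas
--     '''
--
--     freq = dict()
--     lista_palavras_diferentes = []
--
--     for palavra in lista_palavras:
--         p = palavra.lower()
--         if p in freq:
--             freq[p] += 1
--         else:
--             freq[p] = 1
--             lista_palavras_diferentes.append(p)
--
--     return lista_palavras_diferentes
-- ===== SOURCE B (Python) =====
-- def lista_palavras_diferentes(lista_palavras):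
--     '''Distinct lowercased words in first-occurrence order, by the
--     filter-duplicates-ahead (nub) method: take the head, drop all its
--     later occurrences, recurse on the rest. No seen-set/dict needed.'''
--     ws = [p.lower() for p in lista_palavras]
--     out = []
--     while ws:
--         h = ws[0]
--         out.append(h)
--         ws = [w for w in ws[1:] if w != h]
--     return out
-- ===== Notes on version B (the rewrite author's own statement) =====
-- stated objective: alternative
-- what changed: Replaced A's one-pass loop with a seen-frequency dict by a two-stage nub: lowercase all words, then repeatedly emit the head and filter out all its later occurrences before continuing - deduplication by deleting duplicates ahead, with no membership structure at all.
import Mathlib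
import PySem

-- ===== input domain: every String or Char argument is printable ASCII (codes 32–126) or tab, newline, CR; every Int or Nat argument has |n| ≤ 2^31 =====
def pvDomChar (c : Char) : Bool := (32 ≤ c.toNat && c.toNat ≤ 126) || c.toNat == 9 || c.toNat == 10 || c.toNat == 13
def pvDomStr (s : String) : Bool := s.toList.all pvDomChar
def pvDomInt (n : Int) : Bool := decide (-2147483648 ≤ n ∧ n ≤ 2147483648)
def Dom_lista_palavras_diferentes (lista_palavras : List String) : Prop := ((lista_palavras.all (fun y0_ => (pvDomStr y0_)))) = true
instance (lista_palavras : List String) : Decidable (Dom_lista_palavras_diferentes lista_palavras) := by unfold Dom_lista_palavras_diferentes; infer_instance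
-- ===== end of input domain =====

-- B replaces A's one-pass seen-dict loop by a nub that repeatedly emits the head and filters out its later occurrences (no membership structure; trades speed, quadratic worst case) — objective: alternative.


-- ===== PORT A =====
def lista_palavras_diferentes (lista_palavras : List String) : List String :=
  let st := lista_palavras.foldl
    (fun (st : PySem.Dict String Int × List String) palavra =>
      let p := PySem.Str.lower palavra
      if st.1.contains p then
        (st.1.modify p 0 (· + 1), st.2)
      else
        (st.1.insert p 1, st.2 ++ [p]))
    (PySem.Dict.empty, [])
  st.2

-- ===== PORT B =====
-- B's while loop: emit head, drop all its later occurrences, continue on the rest.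
def pvNub (ws : List String) : List String :=
  match ws with
  | [] => []
  | h :: t => h :: pvNub (t.filter (fun w => w ≠ h))
termination_by ws.length
decreasing_by
  simp only [List.length_unattach]
  exact Nat.lt_succ_of_le (le_trans (List.length_filter_le _ _) (by simp))

def lista_palavras_diferentes_alt (lista_palavras : List String) : List String :=
  pvNub (lista_palavras.map PySem.Str.lower)

-- ===== PRECONDITION & SPEC =====
def Spec_lista_palavras_diferentes (lista_palavras : List String) (out : List String) : Prop := out = lista_palavras_diferentes_alt lista_palavras
instance (lista_palavras : List String) (out : List String) : Decidable (Spec_lista_palavras_diferentes lista_palavras out) := by unfold Spec_lista_palavras_diferentes; infer_instance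

-- ===== CLAIM (what is proved, stated in full; the proofs are below) =====
def Claim_equal_lista_palavras_diferentes : Prop := ∀ (lista_palavras : List String), Dom_lista_palavras_diferentes lista_palavras → Spec_lista_palavras_diferentes lista_palavras (lista_palavras_diferentes lista_palavras)

-- ===== LEMMAS AND PROOFS =====

-- Loop invariant for A: if the dict's keys are exactly the accumulator's members,
-- A's loop extends the accumulator exactly as Set.add over the lowered words does.
lemma pv_loop_inv (xs : List String) (d : PySem.Dict String Int) (acc : List String)
    (h : ∀ p, d.contains p = true ↔ p ∈ acc) :
    (xs.foldl
      (fun (st : PySem.Dict String Int × List String) palavra =>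
        let p := PySem.Str.lower palavra
        if st.1.contains p then
          (st.1.modify p 0 (· + 1), st.2)
        else
          (st.1.insert p 1, st.2 ++ [p]))
      (d, acc)).2
    = (xs.map PySem.Str.lower).foldl PySem.Set.add acc := by
  induction xs generalizing d acc with
  | nil => rfl
  | cons x xs ih =>
    simp only [List.foldl_cons, List.map_cons]
    by_cases hc : PySem.Str.lower x ∈ acc
    · have hdc : d.contains (PySem.Str.lower x) = true := (h _).mpr hc
      simp only [hdc, if_true]
      rw [PySem.Set.add_of_mem hc]
      refine ih _ _ (fun q => ?_)
      rw [PySem.Dict.contains_modify]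
      simp only [Bool.or_eq_true, beq_iff_eq, h]
      constructor
      · rintro (rfl | hq)
        · exact hc
        · exact hq
      · exact Or.inr
    · have hdc : d.contains (PySem.Str.lower x) = false := by
        simp only [Bool.eq_false_iff, Ne, h]; exact hc
      simp only [hdc, if_false, Bool.false_eq_true]
      rw [PySem.Set.add_of_not_mem hc]
      refine ih _ _ (fun q => ?_)
      rw [PySem.Dict.contains_insert]
      simp only [Bool.or_eq_true, beq_iff_eq, h, List.mem_append, List.mem_singleton]
      exact or_comm

lemma pvNub_cons (h : String) (t : List String) :
    pvNub (h :: t) = h :: pvNub (t.filter (fun w => w ≠ h)) := by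
  rw [pvNub.eq_def]

-- Bridge: folding Set.add from acc equals acc followed by the nub of the not-yet-seen elements.
lemma pv_fold_add_eq_nub (ys : List String) (acc : List String) :
    ys.foldl PySem.Set.add acc = acc ++ pvNub (ys.filter (fun y => y ∉ acc)) := by
  induction ys generalizing acc with
  | nil => simp [pvNub]
  | cons y ys ih =>
    simp only [List.foldl_cons, List.filter_cons]
    by_cases hy : y ∈ acc
    · rw [PySem.Set.add_of_mem hy]
      simp only [hy, decide_not, decide_true, Bool.not_true, if_false, Bool.false_eq_true]
      simpa [decide_not] using ih acc
    · rw [PySem.Set.add_of_not_mem hy]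
      simp only [hy, decide_not, decide_false, Bool.not_false]
      rw [ih (acc ++ [y])]
      simp only [if_true]
      conv_rhs => rw [pvNub_cons]
      have : (ys.filter (fun w => w ∉ acc)).filter (fun w => w ≠ y)
           = ys.filter (fun w => w ∉ acc ++ [y]) := by
        rw [List.filter_filter]
        refine List.filter_congr (fun w _ => ?_)
        simp [List.mem_append, not_or, and_comm]
      rw [← this, List.append_assoc]
      simp [decide_not]

theorem lista_palavras_diferentes_spec : Claim_equal_lista_palavras_diferentes := by
  intro l _
  show lista_palavras_diferentes l = lista_palavras_diferentes_alt l
  unfold lista_palavras_diferentes lista_palavras_diferentes_alt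
  rw [pv_loop_inv l PySem.Dict.empty [] (by simp [PySem.Dict.contains, PySem.Dict.empty])]
  rw [pv_fold_add_eq_nub]
  simp
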